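-- pv_equiv track=rewrite | github.com/Arsen1302/Code-copy-detector | TestData/solutions/problem_1124_4.py | solution_1124_4
-- ===== SOURCE A (Python) =====
-- from typing import List
--
-- def solution_1124_4(nums: List[int]) -> int:
--     n = len(nums)
--     left = [[] for i in range(n)]
--     right = [[] for i in range(n)]
--     even,odd,ans= [0]*3
--     for i in range(n):
--         left[i] = [even,odd]
--         if i % 2 == 0:
--             even+=nums[i]
--         else:
--             odd+=nums[i]
--     even,odd = 0,0
--     for i in range(n-1,-1,-1):
--         right[i] = [even,odd]
--         if i % 2 == 0:
--             even+=nums[i]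
--         else:
--             odd+=nums[i]
--     for i in range(n):
--         left_even_sum = left[i][0]
--         left_odd_sum = left[i][1]
--         right_even_sum = right[i][0]
--         right_odd_sum = right[i][1]
--         if left_even_sum + right_odd_sum == left_odd_sum + right_even_sum:
--             ans+=1
--     return ans
-- ===== SOURCE B (Python) =====
-- def solution_1124_4(nums):
--     # Reformulation: the balance condition left_even + right_odd == left_odd + right_even
--     # is equivalent to 2*p + a == total over the SIGNED sequence a_i = (-1)^i * nums[i],
--     # where p is the signed prefix sum before i and total the full signed sum.
--     signed = [v if i % 2 == 0 else -v for i, v in enumerate(nums)]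
--     total = sum(signed)
--     ans = 0
--     p = 0
--     for a in signed:
--         if 2 * p + a == total:
--             ans += 1
--         p += a
--     return ans
-- ===== Notes on version B (the rewrite author's own statement) =====
-- stated objective: alternative
-- what changed: Replaced A's even/odd pair bookkeeping with three staged arrays by an algebraic reformulation over the signed sequence a_i=(-1)^i*nums[i]: the balance test becomes the closed-form 2*prefix + a_i == total, checked in one scan with a single scalar accumulator.
import Mathlib
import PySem

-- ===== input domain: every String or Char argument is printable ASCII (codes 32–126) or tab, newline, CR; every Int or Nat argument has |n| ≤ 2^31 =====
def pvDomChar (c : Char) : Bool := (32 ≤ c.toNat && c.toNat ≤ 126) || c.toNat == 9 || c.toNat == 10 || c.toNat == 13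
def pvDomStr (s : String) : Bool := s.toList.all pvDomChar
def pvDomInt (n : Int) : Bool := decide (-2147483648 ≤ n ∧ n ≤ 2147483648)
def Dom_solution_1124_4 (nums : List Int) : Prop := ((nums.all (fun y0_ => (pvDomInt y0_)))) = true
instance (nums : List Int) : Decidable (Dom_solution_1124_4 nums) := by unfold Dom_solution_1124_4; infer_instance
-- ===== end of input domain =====

-- B replaces A's even/odd pair bookkeeping over three staged arrays by an algebraic reformulation:
-- over the signed sequence a_i = (-1)^i * nums[i] the balance test is 2*prefix + a_i == total,
-- checked in one scan with a single scalar accumulator. Same return value.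

-- ===== PORT A =====
-- first loop: left[i] = [even, odd] is assigned in order i = 0..n-1, i.e. appended
def pvLeftStep (nums : List Int) (st : List (Int × Int) × Int × Int) (i : Nat) :
    List (Int × Int) × Int × Int :=
  let L := st.1 ++ [(st.2.1, st.2.2)]
  if i % 2 == 0 then (L, st.2.1 + nums.getD i 0, st.2.2)
  else (L, st.2.1, st.2.2 + nums.getD i 0)

-- second loop: right[i] assigned for i = n-1 .. 0, i.e. prepended while walking the range backwards
def pvRightStep (nums : List Int) (st : List (Int × Int) × Int × Int) (i : Nat) :
    List (Int × Int) × Int × Int :=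
  let R := (st.2.1, st.2.2) :: st.1
  if i % 2 == 0 then (R, st.2.1 + nums.getD i 0, st.2.2)
  else (R, st.2.1, st.2.2 + nums.getD i 0)

-- nums[i] is ported as nums.getD i 0: every access has 0 ≤ i < len(nums), so the default is never used
def solution_1124_4 (nums : List Int) : Int :=
  let n := nums.length
  let left := ((List.range n).foldl (pvLeftStep nums) ([], 0, 0)).1
  let right := ((List.range n).reverse.foldl (pvRightStep nums) ([], 0, 0)).1
  (List.range n).foldl (fun ans i =>
    if (left.getD i (0, 0)).1 + (right.getD i (0, 0)).2
        == (left.getD i (0, 0)).2 + (right.getD i (0, 0)).1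
    then ans + 1 else ans) 0

-- ===== PORT B =====
def solution_1124_4_alt (nums : List Int) : Int :=
  let signed := (PySem.List.enumerate nums).map
    (fun p => if PySem.Int.mod p.1 2 == 0 then p.2 else -p.2)
  let total := signed.sum
  (signed.foldl (fun st a =>
    (st.1 + a, if 2 * st.1 + a == total then st.2 + 1 else st.2)) ((0 : Int), (0 : Int))).2

-- ===== PRECONDITION & SPEC =====
def Spec_solution_1124_4 (nums : List Int) (out : Int) : Prop := out = solution_1124_4_alt nums
instance (nums : List Int) (out : Int) : Decidable (Spec_solution_1124_4 nums out) := by unfold Spec_solution_1124_4; infer_instance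

-- ===== CLAIM (what is proved, stated in full; the proofs are below) =====
def Claim_equal_solution_1124_4 : Prop := ∀ (nums : List Int), Dom_solution_1124_4 nums → Spec_solution_1124_4 nums (solution_1124_4 nums)

-- ===== LEMMAS AND PROOFS =====

-- (pvPre nums i) = (sum of even-indexed, sum of odd-indexed) elements among nums[0..i-1]
def pvPre (nums : List Int) : Nat → Int × Int
  | 0 => (0, 0)
  | i + 1 =>
    let p := pvPre nums i
    if i % 2 == 0 then (p.1 + nums.getD i 0, p.2) else (p.1, p.2 + nums.getD i 0)

-- the common balance condition at index i
def pvC (nums : List Int) (i : Nat) : Bool :=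
  (pvPre nums i).1 + ((pvPre nums nums.length).2 - (pvPre nums (i + 1)).2)
    == (pvPre nums i).2 + ((pvPre nums nums.length).1 - (pvPre nums (i + 1)).1)

-- signed element a_i = (-1)^i * nums[i]
def pvSg (nums : List Int) (i : Nat) : Int :=
  if i % 2 == 0 then nums.getD i 0 else -(nums.getD i 0)

lemma pvLeft_fold (nums : List Int) : ∀ (m k : Nat) (L₀ : List (Int × Int)),
    (List.range' k m).foldl (pvLeftStep nums) (L₀, pvPre nums k)
      = (L₀ ++ (List.range' k m).map (pvPre nums), pvPre nums (k + m)) := by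
  intro m
  induction m with
  | zero => intro k L₀; simp
  | succ m ih =>
    intro k L₀
    rw [List.range'_succ, List.foldl_cons]
    have h1 : pvLeftStep nums (L₀, pvPre nums k) k = (L₀ ++ [pvPre nums k], pvPre nums (k + 1)) := by
      by_cases h : k % 2 = 0 <;> simp [pvLeftStep, pvPre, h]
    rw [h1, ih (k + 1)]
    simp
    ring_nf

lemma pvRight_fold (nums : List Int) : ∀ (m : Nat) (R₀ : List (Int × Int)) (e₀ o₀ : Int),
    (List.range m).reverse.foldl (pvRightStep nums) (R₀, e₀, o₀)
      = ((List.range m).map (fun i =>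
            (e₀ + (pvPre nums m).1 - (pvPre nums (i + 1)).1,
             o₀ + (pvPre nums m).2 - (pvPre nums (i + 1)).2)) ++ R₀,
         e₀ + (pvPre nums m).1, o₀ + (pvPre nums m).2) := by
  intro m
  induction m with
  | zero => intro R₀ e₀ o₀; simp [pvPre]
  | succ m ih =>
    intro R₀ e₀ o₀
    have hrev : (List.range (m + 1)).reverse = m :: (List.range m).reverse := by
      rw [List.range_succ]; simp
    rw [hrev, List.foldl_cons]
    have he : pvRightStep nums (R₀, e₀, o₀) m
        = ((e₀, o₀) :: R₀,
           e₀ + ((pvPre nums (m + 1)).1 - (pvPre nums m).1),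
           o₀ + ((pvPre nums (m + 1)).2 - (pvPre nums m).2)) := by
      by_cases h : m % 2 = 0 <;> simp [pvRightStep, pvPre, h]
    rw [he, ih]
    rw [List.range_succ, List.map_append, Prod.mk.injEq, Prod.mk.injEq]
    refine ⟨?_, by ring, by ring⟩
    simp only [List.map_cons, List.map_nil, List.append_assoc, List.singleton_append]
    congr 1
    · apply List.map_congr_left
      intro i _
      rw [Prod.mk.injEq]
      exact ⟨by ring, by ring⟩
    · congr 1
      rw [Prod.mk.injEq]
      exact ⟨by ring, by ring⟩

lemma pvGetD_map_range {α : Type} (f : Nat → α) (n i : Nat) (d : α) (h : i < n) :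
    ((List.range n).map f).getD i d = f i := by
  rw [List.getD_eq_getElem?_getD]
  simp [h]

-- A's third loop counts exactly the indices satisfying pvC
lemma pvA_count (nums : List Int) :
    solution_1124_4 nums
      = (List.range nums.length).foldl (fun a i => if pvC nums i then a + 1 else a) 0 := by
  unfold solution_1124_4
  simp only []
  have hL := pvLeft_fold nums nums.length 0 []
  have hR := pvRight_fold nums nums.length [] 0 0
  have h0 : pvPre nums 0 = ((0 : Int), (0 : Int)) := rfl
  rw [h0] at hL
  simp only [Nat.zero_add, List.nil_append] at hL
  rw [← List.range_eq_range'] at hL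
  rw [hL, hR]
  apply PySem.List.foldl_congr_mem
  intro a i hi
  have hi' : i < nums.length := List.mem_range.mp hi
  simp only [List.append_nil, pvGetD_map_range, hi', pvC, zero_add]
  rfl

-- the signed list B builds, characterised over indices
lemma pvSigned_eq (nums : List Int) :
    (PySem.List.enumerate nums).map (fun p => if PySem.Int.mod p.1 2 == 0 then p.2 else -p.2)
      = (List.range nums.length).map (pvSg nums) := by
  rw [PySem.List.enumerate_eq_map_pyRange nums 0]
  simp only [PySem.List.len_eq]
  rw [PySem.List.pyRange_zero_natCast, List.map_map,
    List.map_map]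
  apply List.map_congr_left
  intro i hi
  have hi' : i < nums.length := List.mem_range.mp hi
  by_cases h : i % 2 = 0
  · simp [pvSg, h]
    intro hx; omega
  · have h1 : i % 2 = 1 := by omega
    simp [pvSg, h1]
    intro hx; omega

-- signed partial sums are differences of the parity pair sums
lemma pvSum_sg (nums : List Int) : ∀ (m k : Nat),
    ((List.range' k m).map (pvSg nums)).sum
      = ((pvPre nums (k + m)).1 - (pvPre nums (k + m)).2)
        - ((pvPre nums k).1 - (pvPre nums k).2) := by
  intro m
  induction m with
  | zero => intro k; simp
  | succ m ih =>
    intro k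
    rw [List.range'_succ, List.map_cons, List.sum_cons, ih (k + 1)]
    have : k + (m + 1) = (k + 1) + m := by omega
    rw [this]
    by_cases h : k % 2 = 0 <;> simp [pvSg, pvPre, h] <;> ring

-- the balance test in signed form equals pvC
lemma pvB_cond (nums : List Int) (i : Nat) :
    (2 * ((pvPre nums i).1 - (pvPre nums i).2) + pvSg nums i
        == (pvPre nums nums.length).1 - (pvPre nums nums.length).2)
      = pvC nums i := by
  rw [Bool.eq_iff_iff]
  by_cases h : i % 2 = 0 <;>
    simp only [pvC, pvSg, pvPre, h, if_pos, beq_iff_eq] <;>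
    simp <;> constructor <;> intro hx <;> omega

-- B's single scan equals the pvC count
lemma pvB_fold (nums : List Int) (T : Int)
    (hT : T = (pvPre nums nums.length).1 - (pvPre nums nums.length).2) :
    ∀ (m k : Nat) (a₀ : Int),
    (((List.range' k m).map (pvSg nums)).foldl (fun st a =>
        (st.1 + a, if 2 * st.1 + a == T then st.2 + 1 else st.2))
        ((pvPre nums k).1 - (pvPre nums k).2, a₀))
      = ((pvPre nums (k + m)).1 - (pvPre nums (k + m)).2,
         (List.range' k m).foldl (fun a i => if pvC nums i then a + 1 else a) a₀) := by
  intro m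
  induction m with
  | zero => intro k a₀; simp
  | succ m ih =>
    intro k a₀
    rw [List.range'_succ, List.map_cons, List.foldl_cons, List.foldl_cons]
    have hst : ((pvPre nums k).1 - (pvPre nums k).2) + pvSg nums k
        = (pvPre nums (k + 1)).1 - (pvPre nums (k + 1)).2 := by
      by_cases h : k % 2 = 0 <;> simp [pvSg, pvPre, h] <;> ring
    rw [hT, pvB_cond nums k, ← hT]
    simp only [hst]
    rw [ih (k + 1)]
    ring_nf

-- ===== VERDICT (by name: the statement is the Claim_ definition above) =====
theorem solution_1124_4_spec : Claim_equal_solution_1124_4 := by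
  intro nums _
  unfold Spec_solution_1124_4 solution_1124_4_alt
  simp only [pvSigned_eq]
  rw [pvA_count]
  have h0 : pvPre nums 0 = ((0 : Int), (0 : Int)) := rfl
  have hsum : ((List.range nums.length).map (pvSg nums)).sum
      = (pvPre nums nums.length).1 - (pvPre nums nums.length).2 := by
    rw [List.range_eq_range', pvSum_sg nums nums.length 0, h0]
    simp
  simp only [List.range_eq_range'] at hsum ⊢
  have hB := pvB_fold nums _ hsum nums.length 0 0
  simp only [h0, sub_zero, Nat.zero_add] at hB
  rw [hB]
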